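-- pv_equiv track=rewrite | github.com/pypi-data/pypi-mirror-231 | packages/configration/configration-0.0.15-py3-none-any.whl/bfgbidding/src/comments.py | convert_text_to_html
-- ===== SOURCE A (Python) =====
-- def _tag(colour, end_tag=False):
--     """Return a html tag of the colour."""
--     slash = ''
--     if end_tag:
--         slash = '/'
--     return f'<{slash}{colour}>'
--
-- def convert_text_to_html(text):
--     """Convert proprietary text to html."""
--     html = text
--     for colour in ['red', 'blue', 'green', 'yellow']:
--         if _tag(colour) in text:
--             new_text = '<span style="color:%s">' % colour
--             html = html.replace(_tag(colour), new_text)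
--         if _tag(colour, True) in text:
--             html = html.replace(_tag(colour, True), '</span>')
--     return html
-- ===== SOURCE B (Python) =====
-- def convert_text_to_html(text):
--     """Convert proprietary text to html (single left-to-right scan)."""
--     tags = []
--     for colour in ('red', 'blue', 'green', 'yellow'):
--         tags.append(('<%s>' % colour, '<span style="color:%s">' % colour))
--         tags.append(('</%s>' % colour, '</span>'))
--     out = []
--     i = 0
--     n = len(text)
--     while i < n:
--         for tag, rep in tags:
--             if text.startswith(tag, i):
--                 out.append(rep)
--                 i += len(tag)
--                 break
--         else:
--             out.append(text[i])
--             i += 1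
--     return ''.join(out)
-- ===== Notes on version B (the rewrite author's own statement) =====
-- stated objective: alternative
-- what changed: A makes eight sequential str.replace passes (guarded by substring tests on the original text); B does one left-to-right scan over the string, emitting the replacement of whichever tag starts at the current position.
import Mathlib
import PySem

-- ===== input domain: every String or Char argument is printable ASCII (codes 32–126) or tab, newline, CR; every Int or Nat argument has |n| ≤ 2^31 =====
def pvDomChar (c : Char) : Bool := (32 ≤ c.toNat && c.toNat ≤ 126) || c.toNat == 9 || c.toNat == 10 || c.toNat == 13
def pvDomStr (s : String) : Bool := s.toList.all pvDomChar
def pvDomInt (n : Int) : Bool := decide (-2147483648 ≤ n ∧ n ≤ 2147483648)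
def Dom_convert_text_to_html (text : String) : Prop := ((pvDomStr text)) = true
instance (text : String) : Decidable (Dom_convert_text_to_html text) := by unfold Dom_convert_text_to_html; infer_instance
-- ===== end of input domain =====

-- B replaces A's eight sequential str.replace passes (one per colour tag) by a single
-- left-to-right scan that recognises any of the eight tags in place (objective: alternative).

-- ===== PORT A =====
-- helper _tag(colour, end_tag=False)
def pvTag (colour : String) (end_tag : Bool) : String :=
  let slash := if end_tag then "/" else ""
  "<" ++ slash ++ colour ++ ">"

def convert_text_to_html (text : String) : String :=
  (["red", "blue", "green", "yellow"]).foldl (fun html colour =>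
    let html := if PySem.Str.isIn (pvTag colour false) text then
        PySem.Str.replace html (pvTag colour false) ("<span style=\"color:" ++ colour ++ "\">")
      else html
    if PySem.Str.isIn (pvTag colour true) text then
        PySem.Str.replace html (pvTag colour true) "</span>"
      else html) text

-- ===== PORT B =====
-- Source B builds the (tag, replacement) table with a loop over the colours
def pvTags : List (List Char × List Char) :=
  (["red", "blue", "green", "yellow"] : List String).foldl (fun tags colour =>
    tags ++ [(("<" ++ colour ++ ">").toList, ("<span style=\"color:" ++ colour ++ "\">").toList),
             (("</" ++ colour ++ ">").toList, "</span>".toList)]) []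

theorem pvTags_pat_pos : ∀ r ∈ pvTags, 0 < r.1.length := by decide

-- Source B's while loop: at each position emit the replacement of the first matching tag
-- (advancing past it) or copy one character; ''.join at the end
def pvScanGo : List Char → List Char
  | [] => []
  | c :: t =>
    match h : pvTags.find? (fun r => r.1.isPrefixOf (c :: t)) with
    | some r => r.2 ++ pvScanGo ((c :: t).drop r.1.length)
    | none => c :: pvScanGo t
termination_by l => l.length
decreasing_by
  · have hm : r ∈ pvTags := List.mem_of_find?_eq_some h
    have := pvTags_pat_pos r hm
    simp only [List.length_drop, List.length_cons]
    omega
  · simp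

def convert_text_to_html_alt (text : String) : String :=
  String.ofList (pvScanGo text.toList)

-- ===== PRECONDITION & SPEC =====
def Spec_convert_text_to_html (text : String) (out : String) : Prop := out = convert_text_to_html_alt text
instance (text : String) (out : String) : Decidable (Spec_convert_text_to_html text out) := by unfold Spec_convert_text_to_html; infer_instance

-- ===== CLAIM (what is proved, stated in full; the proofs are below) =====
def Claim_equal_convert_text_to_html : Prop := ∀ (text : String), Dom_convert_text_to_html text → Spec_convert_text_to_html text (convert_text_to_html text)

-- ===== LEMMAS AND PROOFS =====

-- fueled generic tag scanner (proof-side model of both programs)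
def pvScan (R : List (List Char × List Char)) : Nat → List Char → List Char
  | 0, l => l
  | _ + 1, [] => []
  | f + 1, c :: t =>
    match R.find? (fun r => r.1.isPrefixOf (c :: t)) with
    | some r => r.2 ++ pvScan R f ((c :: t).drop r.1.length)
    | none => c :: pvScan R f t

theorem pvScan_nil (R : List (List Char × List Char)) (f : Nat) : pvScan R f [] = [] := by
  cases f <;> rfl

theorem pvScan_cons_some {R : List (List Char × List Char)} {c : Char} {t : List Char}
    {r : List Char × List Char} (f : Nat)
    (hf : R.find? (fun r => r.1.isPrefixOf (c :: t)) = some r) :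
    pvScan R (f + 1) (c :: t) = r.2 ++ pvScan R f ((c :: t).drop r.1.length) := by
  simp [pvScan, hf]

theorem pvScan_cons_none {R : List (List Char × List Char)} {c : Char} {t : List Char} (f : Nat)
    (hf : R.find? (fun r => r.1.isPrefixOf (c :: t)) = none) :
    pvScan R (f + 1) (c :: t) = c :: pvScan R f t := by
  simp [pvScan, hf]

theorem pvScan_fuel (R : List (List Char × List Char))
    (hR : ∀ r ∈ R, 0 < r.1.length) :
    ∀ f g l, l.length ≤ f → l.length ≤ g → pvScan R f l = pvScan R g l := by
  intro f
  induction f with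
  | zero =>
    intro g l h1 _
    have : l = [] := List.eq_nil_of_length_eq_zero (Nat.le_zero.mp h1)
    subst this; simp [pvScan_nil, pvScan]
  | succ f ih =>
    intro g l h1 h2
    cases l with
    | nil => simp [pvScan_nil]
    | cons c t =>
      cases g with
      | zero => simp at h2
      | succ g =>
        simp only [List.length_cons] at h1 h2
        cases hf : (R.find? fun r => r.1.isPrefixOf (c :: t)) with
        | some r =>
          have hp := hR r (List.mem_of_find?_eq_some hf)
          rw [pvScan_cons_some f hf, pvScan_cons_some g hf,
            ih g _ (by simp [List.length_drop]; omega) (by simp [List.length_drop]; omega)]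
        | none =>
          rw [pvScan_cons_none f hf, pvScan_cons_none g hf, ih g t (by omega) (by omega)]

theorem pvGo_eq (old new : List Char) :
    ∀ f l acc, PySem.Chars.replace.go old new f l acc = acc.reverse ++ pvScan [(old, new)] f l := by
  intro f
  induction f with
  | zero => intro l acc; rw [PySem.Chars.replace.go]; rfl
  | succ f ih =>
    intro l acc
    cases l with
    | nil => rw [PySem.Chars.replace.go]; simp [pvScan]; omega
    | cons c t =>
      rw [PySem.Chars.replace.go]
      by_cases hp : old.isPrefixOf (c :: t)
      · rw [pvScan_cons_some (r := (old, new)) f (by simp [List.find?, hp])]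
        simp only [hp, if_pos, ih]
        simp
      · rw [pvScan_cons_none f (by simp [List.find?, hp])]
        rw [if_neg (by simpa using hp)]
        simp only [ih]
        simp

def pvScanN (R : List (List Char × List Char)) (l : List Char) : List Char :=
  pvScan R l.length l

theorem pvReplace_eq_scan (old new : List Char) (h : old ≠ []) (s : List Char) :
    PySem.Chars.replace s old new = pvScanN [(old, new)] s := by
  rw [PySem.Chars.replace, if_neg (by simpa using h), pvGo_eq]
  rfl

def pvPatOK : List Char → Bool
  | [] => false
  | c :: v => c == '<' && !v.isEmpty && !v.contains '<'

def pvRepOK : List Char → Bool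
  | [] => false
  | c :: _ => c == '<'

def pvNoOv (q p : List Char) : Bool :=
  (List.range q.length).all fun k => !((q.drop k).isPrefixOf p) && !(p.isPrefixOf (q.drop k))

def pvRulesOK (R : List (List Char × List Char)) (p : List Char) : Prop :=
  (R.all (fun r => pvPatOK r.1 && pvRepOK r.2 && pvNoOv r.2 p) && pvPatOK p) = true

theorem pvRulesOK_elim {R : List (List Char × List Char)} {p : List Char} (h : pvRulesOK R p) :
    (∀ r ∈ R, pvPatOK r.1 = true ∧ pvRepOK r.2 = true ∧ pvNoOv r.2 p = true) ∧ pvPatOK p = true := by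
  simp only [pvRulesOK, Bool.and_eq_true, List.all_eq_true] at h
  exact ⟨fun r hr => ⟨(h.1 r hr).1.1, (h.1 r hr).1.2, (h.1 r hr).2⟩, h.2⟩

theorem pvPatOK_elim {p : List Char} (h : pvPatOK p = true) :
    ∃ v, p = '<' :: v ∧ v ≠ [] ∧ '<' ∉ v := by
  cases p with
  | nil => simp [pvPatOK] at h
  | cons c v =>
    simp only [pvPatOK, Bool.and_eq_true, beq_iff_eq, Bool.not_eq_true'] at h
    exact ⟨v, by rw [h.1.1], by simpa using h.1.2, by simpa using h.2⟩

theorem pvRepOK_elim {q : List Char} (h : pvRepOK q = true) :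
    ∃ w, q = '<' :: w := by
  cases q with
  | nil => simp [pvRepOK] at h
  | cons c w =>
    simp only [pvRepOK, beq_iff_eq] at h
    exact ⟨w, by rw [h]⟩

theorem pvNoOv_elim {q p : List Char} (h : pvNoOv q p = true) :
    ∀ k < q.length, ¬ (q.drop k <+: p) ∧ ¬ (p <+: q.drop k) := by
  intro k hk
  simp only [pvNoOv, List.all_eq_true, List.mem_range] at h
  have := h k hk
  simp only [Bool.and_eq_true, Bool.not_eq_true'] at this
  constructor
  · intro hc; rw [(List.isPrefixOf_iff_prefix).mpr hc] at this; simp at this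
  · intro hc; rw [(List.isPrefixOf_iff_prefix).mpr hc] at this; simp at this

theorem pvScan_no_new_prefix (R : List (List Char × List Char))
    (hrep : ∀ r ∈ R, pvRepOK r.2 = true) :
    ∀ f l v, v ≠ [] → '<' ∉ v → ¬ v <+: l → ¬ v <+: pvScan R f l := by
  intro f
  induction f with
  | zero => intro l v _ _ h; exact h
  | succ f ih =>
    intro l v hv hlt hnp
    cases l with
    | nil => rw [pvScan_nil]; exact hnp
    | cons c t =>
      cases hf : (R.find? fun r => r.1.isPrefixOf (c :: t)) with
      | some r =>
        rw [pvScan_cons_some f hf]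
        obtain ⟨w, hw⟩ := pvRepOK_elim (hrep r (List.mem_of_find?_eq_some hf))
        rw [hw]
        intro hc
        match v, hc with
        | _ :: v', hc =>
          have := List.cons_prefix_cons.mp hc
          exact hlt (this.1 ▸ List.mem_cons_self)
      | none =>
        rw [pvScan_cons_none f hf]
        intro hc
        match v, hc with
        | c' :: v', hc =>
          obtain ⟨hc1, hc2⟩ := List.cons_prefix_cons.mp hc
          subst hc1
          by_cases hv' : v' = []
          · subst hv'; exact hnp (by simp)
          · exact ih t v' hv' (fun hm => hlt (List.mem_cons_of_mem _ hm))
              (fun hp => hnp (List.cons_prefix_cons.mpr ⟨rfl, hp⟩)) hc2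

theorem pvPrefix_append_cases {p u z : List Char} (h : p <+: u ++ z) : p <+: u ∨ u <+: p :=
  List.prefix_or_prefix_of_prefix h (List.prefix_append u z)

theorem pvScan_single_append (p rep q : List Char) (hq : pvNoOv q p = true) :
    ∀ f z, (q ++ z).length ≤ f →
      pvScan [(p, rep)] f (q ++ z) = q ++ pvScan [(p, rep)] (f - q.length) z := by
  induction q with
  | nil => intro f z _; simp
  | cons a q' ih =>
    intro f z hf
    cases f with
    | zero => simp at hf
    | succ f =>
      have hnotm : (p.isPrefixOf (a :: (q' ++ z))) = false := by
        rw [Bool.eq_false_iff]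
        intro hc
        have hc' : p <+: (a :: q') ++ z := by simpa using List.isPrefixOf_iff_prefix.mp hc
        rcases pvPrefix_append_cases hc' with h1 | h1
        · exact (pvNoOv_elim hq 0 (by simp)).2 (by simpa using h1)
        · exact (pvNoOv_elim hq 0 (by simp)).1 (by simpa using h1)
      rw [List.cons_append, pvScan_cons_none f (by simp [List.find?, hnotm])]
      have hq' : pvNoOv q' p = true := by
        simp only [pvNoOv, List.all_eq_true, List.mem_range] at hq ⊢
        intro k hk
        have := hq (k + 1) (by simp; omega)
        simpa [List.drop] using this
      rw [ih hq' f z (by simpa using Nat.le_of_succ_le_succ hf)]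
      simp [List.length_cons]

theorem pvScan_copy (R : List (List Char × List Char)) :
    ∀ u f m, (∀ k < u.length, ∀ r ∈ R, ¬ r.1 <+: (u.drop k ++ m)) → (u ++ m).length ≤ f →
      pvScan R f (u ++ m) = u ++ pvScan R (f - u.length) m := by
  intro u
  induction u with
  | nil => intro f m _ _; simp
  | cons a u' ih =>
    intro f m hno hf
    cases f with
    | zero => simp at hf
    | succ f =>
      have hfind : (R.find? fun r => r.1.isPrefixOf (a :: (u' ++ m))) = none := by
        rw [List.find?_eq_none]
        intro r hr hc
        exact hno 0 (by simp) r hr (by simpa using List.isPrefixOf_iff_prefix.mp hc)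
      rw [List.cons_append, pvScan_cons_none f hfind]
      rw [ih f m (fun k hk r hr => by
          have := hno (k + 1) (by simp; omega) r hr
          simpa [List.drop] using this)
        (by simpa using Nat.le_of_succ_le_succ hf)]
      simp [List.length_cons]

theorem pvScan_skip (R : List (List Char × List Char)) (p rep : List Char) :
    ∀ f l, (∀ k, ¬ p <+: l.drop k) → pvScan (R ++ [(p, rep)]) f l = pvScan R f l := by
  intro f
  induction f with
  | zero => intro l _; rfl
  | succ f ih =>
    intro l hno
    cases l with
    | nil => simp [pvScan_nil]
    | cons c t =>
      have hp0 : (p.isPrefixOf (c :: t)) = false := by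
        rw [Bool.eq_false_iff]
        intro hc
        exact hno 0 (by simpa using List.isPrefixOf_iff_prefix.mp hc)
      have hfind : ((R ++ [(p, rep)]).find? fun r => r.1.isPrefixOf (c :: t))
          = (R.find? fun r => r.1.isPrefixOf (c :: t)) := by
        rw [List.find?_append]
        cases hf : (R.find? fun r => r.1.isPrefixOf (c :: t)) <;> simp [List.find?, hp0]
      cases hf : (R.find? fun r => r.1.isPrefixOf (c :: t)) with
      | some r =>
        rw [pvScan_cons_some f (hfind.trans hf), pvScan_cons_some f hf,
          ih _ (fun k => by rw [List.drop_drop]; exact hno _)]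
      | none =>
        rw [pvScan_cons_none f (hfind.trans hf), pvScan_cons_none f hf,
          ih t (fun k => by simpa using hno (k + 1))]

theorem pvScanN_cons_none {p rep : List Char} {c : Char} {X : List Char}
    (h : (p.isPrefixOf (c :: X)) = false) :
    pvScanN [(p, rep)] (c :: X) = c :: pvScanN [(p, rep)] X := by
  have : pvScanN [(p, rep)] (c :: X) = pvScan [(p, rep)] (X.length + 1) (c :: X) := rfl
  rw [this, pvScan_cons_none X.length (by simp [List.find?, h])]
  rfl

theorem pvScanN_match (p rep Y : List Char) (hp : pvPatOK p = true) :
    pvScanN [(p, rep)] (p ++ Y) = rep ++ pvScanN [(p, rep)] Y := by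
  obtain ⟨v, hpv, hvne, hvlt⟩ := pvPatOK_elim hp
  subst hpv
  have hpre : (('<' :: v).isPrefixOf ('<' :: v ++ Y)) = true :=
    List.isPrefixOf_iff_prefix.mpr (by simpa using List.prefix_append _ Y)
  have h1 : pvScanN [('<' :: v, rep)] (('<' :: v) ++ Y)
      = pvScan [('<' :: v, rep)] ((v ++ Y).length + 1) ('<' :: (v ++ Y)) := by
    simp [pvScanN, List.cons_append]
  have hb : (v.isPrefixOf (v ++ Y)) = true := List.isPrefixOf_iff_prefix.mpr (List.prefix_append v Y)
  rw [h1, pvScan_cons_some (r := ('<' :: v, rep)) _ (by simp [List.find?, hb])]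
  have hdrop : List.drop ('<' :: v).length ('<' :: (v ++ Y)) = Y := by
    simpa [List.cons_append] using List.drop_left ('<' :: v) Y
  rw [hdrop]
  congr 1
  exact pvScan_fuel [('<' :: v, rep)] (by simp) _ _ Y (by simp) le_rfl

theorem pvScan_fusion (R : List (List Char × List Char)) (p rep : List Char)
    (hOK : pvRulesOK R p) :
    ∀ f l, l.length ≤ f →
      pvScanN [(p, rep)] (pvScan R f l) = pvScan (R ++ [(p, rep)]) f l := by
  obtain ⟨hRr, hp⟩ := pvRulesOK_elim hOK
  obtain ⟨v, hpv, hvne, hvlt⟩ := pvPatOK_elim hp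
  have hplen : 0 < p.length := by rw [hpv]; simp
  have hRlen : ∀ r ∈ R, 0 < r.1.length := fun r hr => by
    obtain ⟨v', h1, _, _⟩ := pvPatOK_elim (hRr r hr).1
    rw [h1]; simp
  intro f
  induction f with
  | zero =>
    intro l hl
    have : l = [] := List.eq_nil_of_length_eq_zero (Nat.le_zero.mp hl)
    subst this
    rfl
  | succ f ih =>
    intro l hl
    cases l with
    | nil => rw [pvScan_nil, pvScan_nil]; rfl
    | cons c t =>
      simp only [List.length_cons] at hl
      cases hf : (R.find? fun r => r.1.isPrefixOf (c :: t)) with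
      | some r =>
        have hm := List.mem_of_find?_eq_some hf
        have hr1 := hRlen r hm
        rw [pvScan_cons_some f hf]
        -- copy the replacement r.2, then recurse
        have happ := pvScan_single_append p rep r.2 (hRr r hm).2.2
          (r.2 ++ pvScan R f ((c :: t).drop r.1.length)).length
          (pvScan R f ((c :: t).drop r.1.length)) le_rfl
        have hlen2 : (r.2 ++ pvScan R f ((c :: t).drop r.1.length)).length - r.2.length
            = (pvScan R f ((c :: t).drop r.1.length)).length := by simp
        rw [pvScanN, happ, hlen2]
        rw [show pvScan [(p, rep)] (pvScan R f ((c :: t).drop r.1.length)).length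
              (pvScan R f ((c :: t).drop r.1.length))
            = pvScanN [(p, rep)] (pvScan R f ((c :: t).drop r.1.length)) from rfl]
        rw [ih _ (by simp [List.length_drop]; omega)]
        rw [pvScan_cons_some f (by rw [List.find?_append, hf]; rfl)]
      | none =>
        by_cases hpp : p <+: (c :: t)
        · obtain ⟨m, hm⟩ := hpp
          -- the pattern p is copied verbatim by the scan of R
          have hcopy : pvScan R (f + 1) (c :: t) = p ++ pvScan R (f + 1 - p.length) m := by
            rw [← hm]
            apply pvScan_copy R p (f + 1) m _ (by rw [hm]; simpa using hl)
            intro k hk r' hr' hc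
            cases k with
            | zero =>
              rw [List.drop_zero, hm] at hc
              have := List.find?_eq_none.mp hf r' hr'
              simp only [Bool.not_eq_true] at this
              rw [List.isPrefixOf_iff_prefix.mpr hc] at this
              simp at this
            | succ k' =>
              obtain ⟨v', hv1, _, _⟩ := pvPatOK_elim (hRr r' hr').1
              rw [hpv] at hc
              simp only [List.drop_succ_cons] at hc
              have hklt : k' < v.length := by
                rw [hpv] at hk; simp at hk; omega
              cases hdk : v.drop k' with
              | nil =>
                have hle := List.drop_eq_nil_iff.mp hdk
                omega
              | cons d rest =>
                rw [hdk, hv1] at hc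
                have hdc := (List.cons_prefix_cons.mp (by simpa using hc)).1
                have hdm : d ∈ v := List.drop_subset k' v (hdk ▸ List.mem_cons_self)
                exact hvlt (hdc ▸ hdm)
          rw [hcopy, pvScanN_match p rep _ hp]
          have hmlen : m.length ≤ f + 1 - p.length := by
            have : (c :: t).length = p.length + m.length := by rw [← hm]; simp
            simp at this; omega
          have hfl : pvScan R (f + 1 - p.length) m = pvScan R f m := by
            apply pvScan_fuel R hRlen _ _ m hmlen (by omega)
          rw [hfl, ih m (by omega)]
          have hfind2 : ((R ++ [(p, rep)]).find? fun r => r.1.isPrefixOf (c :: t))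
              = some (p, rep) := by
            have hb2 : (p.isPrefixOf (c :: t)) = true := List.isPrefixOf_iff_prefix.mpr ⟨m, hm⟩
            rw [List.find?_append, hf]
            simp [List.find?, hb2]
          rw [pvScan_cons_some (r := (p, rep)) f hfind2]
          congr 1
          congr 1
          rw [← hm]
          simp
        · -- nothing matches at this position
          rw [pvScan_cons_none f hf]
          have hnp : (p.isPrefixOf (c :: pvScan R f t)) = false := by
            rw [Bool.eq_false_iff]
            intro hc
            have hc' := List.isPrefixOf_iff_prefix.mp hc
            rw [hpv] at hc'
            obtain ⟨h1, h2⟩ := List.cons_prefix_cons.mp hc'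
            have hvt : ¬ v <+: t := by
              intro hvt
              exact hpp (by rw [hpv, ← h1]; exact List.cons_prefix_cons.mpr ⟨rfl, hvt⟩)
            exact pvScan_no_new_prefix R (fun r hr => (hRr r hr).2.1) f t v hvne hvlt hvt h2
          rw [pvScanN_cons_none hnp]
          rw [ih t (by omega)]
          have hfind2 : ((R ++ [(p, rep)]).find? fun r => r.1.isPrefixOf (c :: t)) = none := by
            have hnpf : (p.isPrefixOf (c :: t)) = false := by
              rw [Bool.eq_false_iff]
              exact fun hc => hpp (List.isPrefixOf_iff_prefix.mp hc)
            rw [List.find?_append, hf]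
            simp [List.find?, hnpf]
          rw [pvScan_cons_none f hfind2]

theorem pvScanN_nil_rules : ∀ f (l : List Char), pvScan ([] : List (List Char × List Char)) f l = l := by
  intro f
  induction f with
  | zero => intro l; rfl
  | succ f ih =>
    intro l
    cases l with
    | nil => rfl
    | cons c t => rw [pvScan_cons_none f (by simp), ih]

theorem pvStep (tag rep : String) (R R' : List (List Char × List Char)) (text html : String)
    (hOK : pvRulesOK R tag.toList) (hR' : R' = R ++ [(tag.toList, rep.toList)])
    (hinv : html.toList = pvScanN R text.toList) :
    (if PySem.Str.isIn tag text then PySem.Str.replace html tag rep else html).toList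
      = pvScanN R' text.toList := by
  obtain ⟨v, hpv, hvne, hvlt⟩ := pvPatOK_elim (pvRulesOK_elim hOK).2
  subst hR'
  by_cases hin : PySem.Str.isIn tag text
  · rw [if_pos hin, PySem.Str.replace]
    rw [String.toList_ofList]
    rw [pvReplace_eq_scan _ _ (by rw [hpv]; simp) _, hinv]
    exact pvScan_fusion R tag.toList rep.toList hOK _ _ le_rfl
  · rw [if_neg hin]
    have hno : ∀ k, ¬ tag.toList <+: text.toList.drop k := by
      intro k hc
      exact hin (by
        rw [PySem.Str.isIn_eq]
        exact (PySem.Chars.isIn_iff_infix _ _).mpr (hc.isInfix.trans (List.drop_suffix k _).isInfix))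
    rw [hinv, pvScanN, pvScanN, pvScan_skip R tag.toList rep.toList _ _ hno]

theorem pvScanGo_eq_fuel : ∀ f (l : List Char), l.length ≤ f → pvScanGo l = pvScan pvTags f l := by
  intro f
  induction f with
  | zero =>
    intro l hl
    have : l = [] := List.eq_nil_of_length_eq_zero (Nat.le_zero.mp hl)
    subst this; rw [pvScan_nil]; simp [pvScanGo]
  | succ f ih =>
    intro l hl
    cases l with
    | nil => rw [pvScan_nil]; simp [pvScanGo]
    | cons c t =>
      simp only [List.length_cons] at hl
      cases hf : (pvTags.find? fun r => r.1.isPrefixOf (c :: t)) with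
      | some r =>
        have h1 := pvTags_pat_pos r (List.mem_of_find?_eq_some hf)
        rw [pvScan_cons_some f hf, pvScanGo]
        split
        · next r' h' =>
          cases hf.symm.trans h'
          rw [ih _ (by simp [List.length_drop]; omega)]
        · next h' => rw [hf] at h'; cases h'
      | none =>
        rw [pvScan_cons_none f hf, pvScanGo]
        split
        · next r' h' => rw [hf] at h'; cases h'
        · next h' => rw [ih t (by omega)]

theorem pvScanGo_eq (l : List Char) : pvScanGo l = pvScanN pvTags l :=
  pvScanGo_eq_fuel l.length l le_rfl

def pvR1 : List (List Char × List Char) := [("<red>".toList, "<span style=\"color:red\">".toList)]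
def pvR2 : List (List Char × List Char) := [("<red>".toList, "<span style=\"color:red\">".toList), ("</red>".toList, "</span>".toList)]
def pvR3 : List (List Char × List Char) := [("<red>".toList, "<span style=\"color:red\">".toList), ("</red>".toList, "</span>".toList), ("<blue>".toList, "<span style=\"color:blue\">".toList)]
def pvR4 : List (List Char × List Char) := [("<red>".toList, "<span style=\"color:red\">".toList), ("</red>".toList, "</span>".toList), ("<blue>".toList, "<span style=\"color:blue\">".toList), ("</blue>".toList, "</span>".toList)]
def pvR5 : List (List Char × List Char) := [("<red>".toList, "<span style=\"color:red\">".toList), ("</red>".toList, "</span>".toList), ("<blue>".toList, "<span style=\"color:blue\">".toList), ("</blue>".toList, "</span>".toList), ("<green>".toList, "<span style=\"color:green\">".toList)]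
def pvR6 : List (List Char × List Char) := [("<red>".toList, "<span style=\"color:red\">".toList), ("</red>".toList, "</span>".toList), ("<blue>".toList, "<span style=\"color:blue\">".toList), ("</blue>".toList, "</span>".toList), ("<green>".toList, "<span style=\"color:green\">".toList), ("</green>".toList, "</span>".toList)]
def pvR7 : List (List Char × List Char) := [("<red>".toList, "<span style=\"color:red\">".toList), ("</red>".toList, "</span>".toList), ("<blue>".toList, "<span style=\"color:blue\">".toList), ("</blue>".toList, "</span>".toList), ("<green>".toList, "<span style=\"color:green\">".toList), ("</green>".toList, "</span>".toList), ("<yellow>".toList, "<span style=\"color:yellow\">".toList)]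

theorem pvMain (text : String) : convert_text_to_html text = convert_text_to_html_alt text := by
  have h0 : text.toList = pvScanN ([] : List (List Char × List Char)) text.toList :=
    (pvScanN_nil_rules _ _).symm
  have h1 := pvStep (pvTag "red" false) ("<span style=\"color:" ++ "red" ++ "\">") _ pvR1 text text
    (by unfold pvRulesOK; decide) (by decide) h0
  have h2 := pvStep (pvTag "red" true) "</span>" _ pvR2 text _
    (by unfold pvRulesOK; decide) (by decide) h1
  have h3 := pvStep (pvTag "blue" false) ("<span style=\"color:" ++ "blue" ++ "\">") _ pvR3 text _
    (by unfold pvRulesOK; decide) (by decide) h2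
  have h4 := pvStep (pvTag "blue" true) "</span>" _ pvR4 text _
    (by unfold pvRulesOK; decide) (by decide) h3
  have h5 := pvStep (pvTag "green" false) ("<span style=\"color:" ++ "green" ++ "\">") _ pvR5 text _
    (by unfold pvRulesOK; decide) (by decide) h4
  have h6 := pvStep (pvTag "green" true) "</span>" _ pvR6 text _
    (by unfold pvRulesOK; decide) (by decide) h5
  have h7 := pvStep (pvTag "yellow" false) ("<span style=\"color:" ++ "yellow" ++ "\">") _ pvR7 text _
    (by unfold pvRulesOK; decide) (by decide) h6
  have h8 := pvStep (pvTag "yellow" true) "</span>" _ pvTags text _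
    (by unfold pvRulesOK; decide) (by decide) h7
  have hB : (convert_text_to_html_alt text).toList = pvScanN pvTags text.toList := by
    rw [convert_text_to_html_alt, String.toList_ofList, pvScanGo_eq]
  apply String.toList_injective
  rw [hB]
  simpa only [convert_text_to_html, List.foldl_cons, List.foldl_nil] using h8

-- ===== VERDICT (by name: the statement is the Claim_ definition above) =====
theorem convert_text_to_html_spec : Claim_equal_convert_text_to_html := by
  intro text _
  exact pvMain text
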